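-- pv_equiv track=rewrite | github.com/Gwxnbleidd/data_protection_sem1 | ЛР3/app/utils/encryption.py | rearrangement
-- ===== SOURCE A (Python) =====
-- def form_key(password: str):
--     key = []
--     password = list(password)
--     sort_password = sorted(password)
--     for el in password:
--         index = sort_password.index(el)
--         key.append(index)
--         sort_password[index] = '\1'
--     return key
--
-- def rearrangement(login, password):
--     # Формирование ключа
--     key = form_key(password)
--
--     if len(key) > len(login):
--         key = key[0:len(login)]
--
--     while len(login) % len(key) != 0:
--         login +=' '
--
--     blocks = []
--     while login :
--         blocks.append(login[0:len(key)])
--         login = login[len(key): len(login)]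
--
--     # Перестановка
--     c = []
--     for block in blocks:
--         for j in range(len(key)):
--             c.append(block[key[j]])
--
--     return ''.join([str(c_i) for c_i in c])
-- ===== SOURCE B (Python) =====
-- # B: ranks via direct counting (no sort/index/mutation), arithmetic padding, flat indexing.
-- def _ranks(password):
--     return [sum(c < ch for c in password) + password[:i].count(ch)
--             for i, ch in enumerate(password)]
--
-- def rearrangement(login, password):
--     key = _ranks(password)[:len(login)]
--     k = len(key)
--     pad = -len(login) % k
--     text = login + ' ' * pad
--     return ''.join(text[q * k + key[j]]
--                    for q in range(len(text) // k)
--                    for j in range(k))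
-- ===== Notes on version B (the rewrite author's own statement) =====
-- stated objective: alternative
-- what changed: The key is computed by a direct per-position counting formula for the stable rank (#smaller chars anywhere + #equal chars before) instead of sorting a copy and repeatedly calling list.index with in-place '\x01' marking, and the while-loop padding and block-slicing are replaced by arithmetic padding (-len % k) and flat indexing text[q*k + key[j]].
import Mathlib
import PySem

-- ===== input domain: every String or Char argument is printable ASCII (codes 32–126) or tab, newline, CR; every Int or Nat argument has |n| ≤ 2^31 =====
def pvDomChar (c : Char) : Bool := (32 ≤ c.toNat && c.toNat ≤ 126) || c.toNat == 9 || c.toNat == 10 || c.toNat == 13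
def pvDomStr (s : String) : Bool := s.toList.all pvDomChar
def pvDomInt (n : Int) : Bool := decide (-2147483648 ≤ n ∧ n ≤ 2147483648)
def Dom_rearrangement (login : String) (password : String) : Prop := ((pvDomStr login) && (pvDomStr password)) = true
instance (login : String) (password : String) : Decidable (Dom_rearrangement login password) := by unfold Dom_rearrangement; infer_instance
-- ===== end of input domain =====

-- B replaces A's sort + repeated list.index + in-place marking by a direct per-position
-- counting formula for the stable rank, and A's while-loop padding and block-slicing by
-- arithmetic padding and flat indexing (objective: alternative decomposition, same cost class).

-- ===== PORT A =====
-- form_key: for each char, first index in the (mutated) sorted copy, then mark that slot '\x01'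
def formKey (password : String) : List Int :=
  let p := password.toList
  ((p.foldl (fun (st : List Int × List Char) el =>
      -- index = sort_password.index(el); ValueError impossible: el is drawn from password,
      -- so the .getD 0 on the Option is never taken on any input reaching this code
      ((st.1 ++ [(((PySem.List.index? st.2 el).getD 0 : Nat) : Int)]),
       PySem.List.pySetD st.2 (((PySem.List.index? st.2 el).getD 0 : Nat) : Int) '\x01'))
    (([] : List Int), PySem.List.sorted p (fun c => c) false))).1

-- while len(login) % len(key) != 0: login += ' '   (k = 0: Python raises ZeroDivisionError,
-- excluded by Pre_; the k = 0 guard only makes the recursion total)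
def padA (k : Nat) (L : List Char) : List Char :=
  if _h : k = 0 then L
  else if L.length % k = 0 then L else padA k (L ++ [' '])
  termination_by (k - L.length % k) % k
  decreasing_by
    have hk : 0 < k := by omega
    have hr : L.length % k < k := Nat.mod_lt _ hk
    have h1 : (L ++ [' ']).length % k = (L.length % k + 1) % k := by
      simp only [List.length_append, List.length_singleton]
      conv_lhs => rw [← Nat.mod_add_mod]
    have h2 : (k - L.length % k) % k = k - L.length % k := Nat.mod_eq_of_lt (by omega)
    rw [h1, h2]
    by_cases he : L.length % k + 1 = k
    · rw [he, Nat.mod_self, Nat.sub_zero, Nat.mod_self]; omega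
    · have h3 : (L.length % k + 1) % k = L.length % k + 1 := Nat.mod_eq_of_lt (by omega)
      rw [h3, Nat.mod_eq_of_lt (by omega)]; omega

-- while login: blocks.append(login[0:len(key)]); login = login[len(key):len(login)]
def chunksA (k : Nat) (L : List Char) : List (List Char) :=
  if _h : L = [] then []
  else if _hk : k = 0 then []   -- unreachable: when this loop runs, len(key) ≠ 0 (Pre_)
  else PySem.List.slice L (some 0) (some (k : Int)) ::
       chunksA k (PySem.List.slice L (some (k : Int)) (some (L.length : Int)))
  termination_by L.length
  decreasing_by
    simp only [PySem.List.slice_natCast]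
    have : L.length ≠ 0 := by simpa [List.length_eq_zero_iff] using _h
    simp only [List.length_take, List.length_drop]; omega

def rearrangement (login : String) (password : String) : String :=
  let key0 := formKey password
  let key := if key0.length > login.toList.length
             then PySem.List.slice key0 (some 0) (some (login.toList.length : Int))
             else key0
  let L := padA key.length login.toList
  let blocks := chunksA key.length L
  let c := blocks.foldl (fun acc block =>
      (PySem.List.pyRange 0 (key.length : Int) 1).foldl (fun acc2 j =>
        -- c.append(block[key[j]]); pyGetD is the total form, in range under Pre_
        acc2 ++ [PySem.List.pyGetD block (PySem.List.pyGetD key j 0) ' ']) acc) []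
  String.ofList c   -- ''.join([str(c_i) for c_i in c]): str of a 1-char string is itself

-- ===== PORT B =====
-- _ranks: stable rank of each char = (#smaller anywhere) + (#equal before it)
def ranksB (password : List Char) : List Int :=
  (PySem.List.enumerate password 0).map (fun ic =>
    ((password.countP (fun c => decide (c < ic.2)) : Int) +
     (PySem.List.count (PySem.List.slice password none (some ic.1)) ic.2 : Int)))

def rearrangement_alt (login : String) (password : String) : String :=
  let key := PySem.List.slice (ranksB password.toList) none (some (login.toList.length : Int))
  let k := key.length
  if _h : k = 0 then ""   -- unreachable under Pre_: '-len(login) % k' raises in Python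
  else
    let pad := (PySem.Int.mod (-(login.toList.length : Int)) (k : Int)).toNat
    let text := login.toList ++ List.replicate pad ' '
    String.ofList ((List.range (text.length / k)).flatMap (fun q =>
      (List.range k).map (fun (j : Nat) =>
        PySem.List.pyGetD text ((q * k : Nat) + PySem.List.pyGetD key ((j : Nat) : Int) 0) ' ')))

-- ===== PRECONDITION & SPEC =====
-- Pre_ = exactly the inputs on which the Python A returns: both strings nonempty (else the
-- padding loop divides by zero), and, when the key is truncated (password longer than login),
-- every kept rank — a counting property of the password: #smaller chars + #equal chars before —
-- stays below the block length, else A's block[key[j]] raises IndexError.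
def Pre_rearrangement (login : String) (password : String) : Prop :=
  login.toList ≠ [] ∧ password.toList ≠ [] ∧
  (password.toList.length ≤ login.toList.length ∨
    ∀ i < login.toList.length,
      password.toList.countP (fun c => decide (c < password.toList.getD i ' ')) +
        (password.toList.take i).count (password.toList.getD i ' ') < login.toList.length)
instance (login : String) (password : String) : Decidable (Pre_rearrangement login password) := by
  unfold Pre_rearrangement; infer_instance

def pvWitness_rearrangement : String × String := ("abcde", "cab")

def Spec_rearrangement (login : String) (password : String) (out : String) : Prop := out = rearrangement_alt login password
instance (login : String) (password : String) (out : String) : Decidable (Spec_rearrangement login password out) := by unfold Spec_rearrangement; infer_instance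

-- ===== CLAIM (what is proved, stated in full; the proofs are below) =====
def Claim_equal_rearrangement : Prop := ∀ (login : String) (password : String), Dom_rearrangement login password → Pre_rearrangement login password → Spec_rearrangement login password (rearrangement login password)

-- ===== LEMMAS AND PROOFS =====

-- rank of the next char c of p, given the already-processed prefix pre
def rkAux (p pre : List Char) (c : Char) : Nat :=
  p.countP (fun x => decide (x < c)) + pre.count c

-- the ranks A's loop emits for the remaining suffix suf of p
def ranksFrom (p pre suf : List Char) : List Int :=
  match suf with
  | [] => []
  | c :: rest => ((rkAux p pre c : Nat) : Int) :: ranksFrom p (pre ++ [c]) rest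

-- countP (< c) + count c never exceeds the length
theorem rk_le_length (l : List Char) (c : Char) :
    l.countP (fun x => decide (x < c)) + l.count c ≤ l.length := by
  induction l with
  | nil => simp
  | cons a t ih =>
    by_cases h : a < c <;> by_cases h2 : a = c <;> simp_all <;> omega

-- elements at or past position j of a ≤-sorted list are ≥ the element at j
theorem sorted_drop_ge {s : List Char} (hs : s.Pairwise (· ≤ ·))
    {j : Nat} (hj : j < s.length) : ∀ x ∈ s.drop j, s[j] ≤ x := by
  intro x hxmem
  rw [List.mem_iff_getElem] at hxmem
  obtain ⟨t, ht, rfl⟩ := hxmem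
  rw [List.getElem_drop]
  rcases Nat.eq_zero_or_pos t with rfl | htpos
  · simp
  · exact (List.pairwise_iff_getElem.1 hs) j (j + t)
      hj (by rw [List.length_drop] at ht; omega) (by omega)

theorem sorted_take_le {s : List Char} (hs : s.Pairwise (· ≤ ·))
    {j : Nat} (hj : j < s.length) : ∀ x ∈ s.take (j + 1), x ≤ s[j] := by
  intro x hxmem
  rw [List.mem_iff_getElem] at hxmem
  obtain ⟨t, ht, rfl⟩ := hxmem
  rw [List.getElem_take]
  have ht' : t < j + 1 := lt_of_lt_of_le ht (by simp [List.length_take])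
  rcases Nat.lt_or_ge t j with h | h
  · exact (List.pairwise_iff_getElem.1 hs) t j (by omega) hj h
  · have : t = j := by omega
    subst this; exact le_refl _

-- in a ≤-sorted list, the values < c all sit before any position holding a value ≥ c
theorem countP_lt_le_of_le {s : List Char} (hs : s.Pairwise (· ≤ ·))
    {j : Nat} (hj : j < s.length) {c : Char} (hcj : c ≤ s[j]) :
    s.countP (fun x => decide (x < c)) ≤ j := by
  have hsplit : s.countP (fun x => decide (x < c)) =
      (s.take j).countP (fun x => decide (x < c)) +
      (s.drop j).countP (fun x => decide (x < c)) := by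
    conv_lhs => rw [← List.take_append_drop j s]
    rw [List.countP_append]
  have hdrop : (s.drop j).countP (fun x => decide (x < c)) = 0 := by
    rw [List.countP_eq_zero]
    intro x hx
    have := sorted_drop_ge hs hj x hx
    simp only [decide_eq_true_eq]
    intro hlt; exact absurd (lt_of_lt_of_le hlt (le_trans hcj this)) (lt_irrefl x)
  have htake : (s.take j).countP (fun x => decide (x < c)) ≤ j :=
    le_trans List.countP_le_length (List.length_take_le _ _)
  omega

-- in a ≤-sorted list, positions inside c's block hold c
theorem sorted_getElem_eq_of_block {s : List Char} (hs : s.Pairwise (· ≤ ·))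
    {j : Nat} (hj : j < s.length) {c : Char}
    (h1 : s.countP (fun x => decide (x < c)) ≤ j)
    (h2 : j < s.countP (fun x => decide (x < c)) + s.count c) : s[j] = c := by
  rcases lt_trichotomy s[j] c with hlt | heq | hgt
  · exfalso
    have hall : (s.take (j + 1)).countP (fun x => decide (x < c)) = (s.take (j + 1)).length := by
      rw [List.countP_eq_length]
      intro x hx
      exact decide_eq_true (lt_of_le_of_lt (sorted_take_le hs hj x hx) hlt)
    have hlen : (s.take (j + 1)).length = j + 1 := by simp [List.length_take]; omega
    have : (s.take (j + 1)).countP (fun x => decide (x < c)) ≤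
        s.countP (fun x => decide (x < c)) := by
      conv_rhs => rw [← List.take_append_drop (j + 1) s]
      rw [List.countP_append]; omega
    omega
  · exact heq
  · exfalso
    have hdge := sorted_drop_ge hs hj
    have hdropP : (s.drop j).countP (fun x => decide (x < c)) = 0 := by
      rw [List.countP_eq_zero]
      intro x hx
      simp only [decide_eq_true_eq]
      intro hlt
      exact absurd (lt_trans hlt (lt_of_lt_of_le hgt (hdge x hx))) (lt_irrefl x)
    have hdropC : (s.drop j).count c = 0 := by
      rw [List.count_eq_zero]
      intro hmem
      exact absurd (lt_of_lt_of_le hgt (hdge c hmem)) (lt_irrefl c)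
    have hP : s.countP (fun x => decide (x < c)) = (s.take j).countP (fun x => decide (x < c)) := by
      conv_lhs => rw [← List.take_append_drop j s]
      rw [List.countP_append, hdropP]
      omega
    have hC : s.count c = (s.take j).count c := by
      conv_lhs => rw [← List.take_append_drop j s]
      rw [List.count_append, hdropC]
      omega
    have := rk_le_length (s.take j) c
    have hlen : (s.take j).length ≤ j := by simp [List.length_take]
    omega

-- the sorted copy of p
def sortedP (p : List Char) : List Char := PySem.List.sorted p (fun c => c) false

def markedAux (p pre : List Char) : List Char :=
  (sortedP p).mapIdx (fun j c => if j < rkAux p pre c then '\x01' else c)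

theorem sortedP_pairwise (p : List Char) : (sortedP p).Pairwise (· ≤ ·) :=
  PySem.List.sorted_pairwise p (fun c => c)

theorem sortedP_perm (p : List Char) : (sortedP p).Perm p :=
  PySem.List.sorted_perm p (fun c => c) false

theorem sortedP_length (p : List Char) : (sortedP p).length = p.length :=
  PySem.List.length_sorted p (fun c => c) false



theorem markedAux_length (p pre : List Char) :
    (markedAux p pre).length = p.length := by
  simp [markedAux, sortedP_length]

theorem markedAux_getElem (p pre : List Char) {j : Nat}
    (hj : j < (sortedP p).length) :
    (markedAux p pre)[j]'(by rw [markedAux_length]; rw [sortedP_length] at hj; exact hj) =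
      (if j < rkAux p pre (sortedP p)[j] then '\x01' else (sortedP p)[j]) := by
  simp [markedAux, sortedP, List.getElem_mapIdx]

theorem markedAux_nil (p : List Char) : markedAux p [] = sortedP p := by
  apply List.ext_getElem
  · rw [markedAux_length, sortedP_length]
  · intro j h1 h2
    have hle := countP_lt_le_of_le (sortedP_pairwise p) h2 (le_refl (sortedP p)[j])
    have hcnt := (sortedP_perm p).countP_eq (fun x => decide (x < (sortedP p)[j]))
    rw [markedAux_getElem p [] h2,
        if_neg (by simp only [rkAux, List.count_nil, Nat.add_zero]; omega)]

theorem rkAux_lt_sortedP_length (p pre : List Char) (c : Char)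
    (hcnt : pre.count c < p.count c) : rkAux p pre c < (sortedP p).length := by
  have h1 := rk_le_length p c
  have h2 := sortedP_length p
  unfold rkAux
  omega

theorem sortedP_getElem_rkAux (p pre : List Char) (c : Char)
    (hcnt : pre.count c < p.count c) :
    (sortedP p)[rkAux p pre c]'(rkAux_lt_sortedP_length p pre c hcnt) = c := by
  have hcP := (sortedP_perm p).countP_eq (fun x => decide (x < c))
  have hcC := (sortedP_perm p).count_eq c
  apply sorted_getElem_eq_of_block (sortedP_pairwise p) (rkAux_lt_sortedP_length p pre c hcnt)
  · rw [hcP]; simp [rkAux]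
  · rw [hcP, hcC]; simp only [rkAux]; omega

theorem index?_markedAux (p pre : List Char) (c : Char) (hx : c ≠ '\x01')
    (hcnt : pre.count c < p.count c) :
    PySem.List.index? (markedAux p pre) c = some (rkAux p pre c) := by
  have hJlt := rkAux_lt_sortedP_length p pre c hcnt
  have hsJ := sortedP_getElem_rkAux p pre c hcnt
  rw [PySem.List.index?_eq_idxOf?, List.idxOf?_eq_some_iff]
  refine ⟨by
    have := markedAux_length p pre
    have := sortedP_length p
    omega, ?_, ?_⟩
  · rw [markedAux_getElem p pre hJlt, hsJ, if_neg (lt_irrefl _)]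
  · intro t htJ
    have hts : t < (sortedP p).length := by omega
    rw [markedAux_getElem p pre hts]
    split_ifs with hmark
    · intro h; exact hx h.symm
    · intro heq
      rw [heq] at hmark
      omega

theorem markedAux_step (p pre : List Char) (c : Char) (hx : c ≠ '\x01')
    (hcnt : pre.count c < p.count c) :
    markedAux p (pre ++ [c]) = (markedAux p pre).set (rkAux p pre c) '\x01' := by
  have hJlt := rkAux_lt_sortedP_length p pre c hcnt
  have hsJ := sortedP_getElem_rkAux p pre c hcnt
  have hrk' : ∀ x : Char, rkAux p (pre ++ [c]) x =
      rkAux p pre x + if x = c then 1 else 0 := by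
    intro x
    by_cases hxc : x = c
    · subst hxc
      have h1 : List.count x [x] = 1 := by simp
      simp only [rkAux, List.count_append, h1]
      simp only [if_pos trivial]
      omega
    · have h1 : List.count x [c] = 0 := by
        rw [List.count_eq_zero]
        simp [hxc]
      simp only [rkAux, List.count_append, h1, if_neg hxc]
      omega
  apply List.ext_getElem
  · simp [markedAux_length]
  · intro j h1 h2
    have hjs : j < (sortedP p).length := by
      have h3 := markedAux_length p (pre ++ [c])
      have h4 := sortedP_length p
      omega
    rw [markedAux_getElem p (pre ++ [c]) hjs, List.getElem_set,
        markedAux_getElem p pre hjs]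
    simp only [hrk']
    by_cases hc : (sortedP p)[j] = c
    · simp only [hc, if_true]
      by_cases hjJ : rkAux p pre c = j
      · rw [if_pos hjJ, if_pos (by omega)]
      · rw [if_neg hjJ]
        have hiff : (j < rkAux p pre c + 1) ↔ (j < rkAux p pre c) := by omega
        simp only [hiff]
    · have hne : rkAux p pre c ≠ j := by
        intro h
        simp only [h] at hsJ
        exact hc hsJ
      rw [if_neg hne]
      simp only [if_neg hc, Nat.add_zero]

theorem loop_eq (p : List Char) (hx : '\x01' ∉ p) :
    ∀ (suf pre : List Char) (acc : List Int), p = pre ++ suf →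
    (suf.foldl (fun (st : List Int × List Char) el =>
        ((st.1 ++ [(((PySem.List.index? st.2 el).getD 0 : Nat) : Int)]),
         PySem.List.pySetD st.2 (((PySem.List.index? st.2 el).getD 0 : Nat) : Int) '\x01'))
      (acc, markedAux p pre)).1 = acc ++ ranksFrom p pre suf := by
  intro suf
  induction suf with
  | nil => intro pre acc _; simp [ranksFrom]
  | cons c rest ih =>
    intro pre acc hp
    have hcp : c ∈ p := by rw [hp]; simp
    have hxc : c ≠ '\x01' := fun h => hx (h ▸ hcp)
    have hcnt : pre.count c < p.count c := by
      rw [hp, List.count_append, List.count_cons_self]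
      omega
    rw [List.foldl_cons]
    show (List.foldl (fun (st : List Int × List Char) el =>
        ((st.1 ++ [(((PySem.List.index? st.2 el).getD 0 : Nat) : Int)]),
         PySem.List.pySetD st.2 (((PySem.List.index? st.2 el).getD 0 : Nat) : Int) '\x01'))
        ((acc ++ [(((PySem.List.index? (markedAux p pre) c).getD 0 : Nat) : Int)]),
         PySem.List.pySetD (markedAux p pre)
           (((PySem.List.index? (markedAux p pre) c).getD 0 : Nat) : Int) '\x01') rest).1
      = acc ++ ranksFrom p pre (c :: rest)
    rw [index?_markedAux p pre c hxc hcnt, Option.getD_some,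
        PySem.List.pySetD_natCast (markedAux p pre) (rkAux p pre c) '\x01',
        ← markedAux_step p pre c hxc hcnt,
        ih (pre ++ [c]) (acc ++ [((rkAux p pre c : Nat) : Int)]) (by rw [hp]; simp)]
    simp [ranksFrom]

theorem formKey_eq (password : String) (hx : '\x01' ∉ password.toList) :
    formKey password = ranksFrom password.toList [] password.toList := by
  have h := loop_eq password.toList hx password.toList [] [] rfl
  rw [markedAux_nil] at h
  simpa [formKey] using h

theorem ranksB_gen (p : List Char) : ∀ (suf pre : List Char), p = pre ++ suf →
    (PySem.List.enumerate suf (pre.length : Int)).map (fun ic =>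
      ((p.countP (fun c => decide (c < ic.2)) : Int) +
       (PySem.List.count (PySem.List.slice p none (some ic.1)) ic.2 : Int))) =
    ranksFrom p pre suf := by
  intro suf
  induction suf with
  | nil => intro pre _; simp [ranksFrom, PySem.List.enumerate]
  | cons c rest ih =>
    intro pre hp
    rw [PySem.List.enumerate_cons, List.map_cons]
    have hhead : ((p.countP (fun x => decide (x < c)) : Int) +
        (PySem.List.count (PySem.List.slice p none (some (pre.length : Int))) c : Int)) =
        ((rkAux p pre c : Nat) : Int) := by
      rw [PySem.List.slice_to_natCast, hp, List.take_left, PySem.List.count_eq]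
      simp only [rkAux]
      push_cast
      ring
    have htail : ((pre.length : Int) + 1) = (((pre ++ [c]).length : Nat) : Int) := by
      simp
    rw [hhead, htail, ih (pre ++ [c]) (by rw [hp]; simp)]
    simp [ranksFrom]

theorem ranksB_eq (p : List Char) : ranksB p = ranksFrom p [] p := by
  have h := ranksB_gen p p [] rfl
  simpa [ranksB] using h

theorem ranksFrom_length (p : List Char) : (ranksFrom p [] p).length = p.length := by
  rw [← ranksB_eq]
  simp [ranksB, PySem.List.length_enumerate]

theorem ranksFrom_getElem (p : List Char) {i : Nat} (hi : i < p.length) :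
    (ranksFrom p [] p)[i]'(by rw [ranksFrom_length]; exact hi) =
      ((rkAux p (p.take i) p[i] : Nat) : Int) := by
  rw [List.getElem_eq_iff, ← ranksB_eq]
  simp only [ranksB, List.getElem?_map, PySem.List.getElem?_enumerate,
    List.getElem?_eq_getElem hi, Option.map_some]
  simp only [Option.some.injEq, zero_add, PySem.List.slice_to_natCast,
    PySem.List.count_eq, rkAux]
  push_cast
  ring

theorem rkAux_take_lt (p : List Char) {i : Nat} (hi : i < p.length) :
    rkAux p (p.take i) p[i] < p.length := by
  have h1 := rk_le_length p p[i]
  have h2' : ∀ a : Char, p.count a = (p.take i).count a + (p.drop i).count a := by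
    intro a
    conv_lhs => rw [← List.take_append_drop i p]
    rw [List.count_append]
  have h2 := h2' p[i]
  have h3 : 1 ≤ (p.drop i).count p[i] := by
    rw [List.drop_eq_getElem_cons hi, List.count_cons_self]
    omega
  simp only [rkAux]
  omega

theorem padA_eq (k : Nat) (hk : k ≠ 0) (L : List Char) :
    padA k L = L ++ List.replicate ((k - L.length % k) % k) ' ' := by
  fun_induction padA k L with
  | case1 L h => omega
  | case2 L h h0 => rw [h0]; simp
  | case3 L h h0 ih =>
    rw [ih]
    have hk0 : 0 < k := by omega
    have hr : L.length % k < k := Nat.mod_lt _ hk0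
    have h1 : (L ++ [' ']).length % k = (L.length % k + 1) % k := by
      simp only [List.length_append, List.length_singleton]
      conv_lhs => rw [← Nat.mod_add_mod]
    have harith : (k - L.length % k) % k = (k - (L ++ [' ']).length % k) % k + 1 := by
      have hlhs : (k - L.length % k) % k = k - L.length % k := Nat.mod_eq_of_lt (by omega)
      rw [hlhs, h1]
      by_cases he : L.length % k + 1 = k
      · rw [he, Nat.mod_self, Nat.sub_zero, Nat.mod_self]; omega
      · rw [Nat.mod_eq_of_lt (show L.length % k + 1 < k by omega),
            Nat.mod_eq_of_lt (show k - (L.length % k + 1) < k by omega)]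
        omega
    rw [harith, List.replicate_succ, List.append_assoc]
    rfl

theorem chunksA_eq_aux (k : Nat) (hk : k ≠ 0) :
    ∀ (N : Nat) (T : List Char), T.length ≤ N → k ∣ T.length →
    chunksA k T = (List.range (T.length / k)).map (fun q => (T.drop (q * k)).take k) := by
  intro N
  induction N with
  | zero =>
    intro T hle _
    have hTnil : T = [] := by rw [← List.length_eq_zero_iff]; omega
    subst hTnil
    rw [chunksA]
    simp
  | succ N ih =>
    intro T hle hdvd
    by_cases hT : T = []
    · subst hT; rw [chunksA]; simp
    · have hlen0 : T.length ≠ 0 := by simpa [List.length_eq_zero_iff] using hT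
      have hkT : k ≤ T.length := Nat.le_of_dvd (by omega) hdvd
      rw [chunksA, dif_neg hT, dif_neg hk,
          PySem.List.slice_zero_start, PySem.List.slice_to_natCast, PySem.List.slice_natCast]
      have hdropeq : (T.drop k).take (T.length - k) = T.drop k := by
        apply List.take_of_length_le
        simp [List.length_drop]
      rw [hdropeq]
      have hdvd' : k ∣ (T.drop k).length := by
        rw [List.length_drop]
        exact Nat.dvd_sub hdvd dvd_rfl
      rw [ih (T.drop k) (by simp [List.length_drop]; omega) hdvd']
      have hq : T.length / k = (T.drop k).length / k + 1 := by
        rw [List.length_drop]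
        have h5 : T.length - k + k = T.length := by omega
        calc T.length / k = (T.length - k + k) / k := by rw [h5]
        _ = (T.length - k) / k + 1 := Nat.add_div_right _ (by omega)
      rw [hq, List.range_succ_eq_map, List.map_cons, List.map_map]
      congr 1
      · simp
      · apply List.map_congr_left
        intro q _
        simp only [Function.comp_apply, List.drop_drop]
        congr 2
        rw [Nat.succ_mul]
        omega

theorem chunksA_eq (k : Nat) (hk : k ≠ 0) (T : List Char) (hdvd : k ∣ T.length) :
    chunksA k T = (List.range (T.length / k)).map (fun q => (T.drop (q * k)).take k) :=
  chunksA_eq_aux k hk T.length T le_rfl hdvd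

theorem pad_dvd (n k : Nat) (hk : k ≠ 0) : k ∣ (n + (k - n % k) % k) := by
  have h4 : n % k < k := Nat.mod_lt _ (Nat.pos_of_ne_zero hk)
  rcases Nat.eq_zero_or_pos (n % k) with h0 | h0
  · rw [h0, Nat.sub_zero, Nat.mod_self, Nat.add_zero]
    exact Nat.dvd_of_mod_eq_zero h0
  · rw [Nat.mod_eq_of_lt (by omega)]
    apply Nat.dvd_of_mod_eq_zero
    conv_lhs => rw [← Nat.mod_add_mod]
    rw [show n % k + (k - n % k) = k from by omega, Nat.mod_self]

-- Python's  -n % k  (k > 0) as a Nat expression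
theorem negmod_eq (n k : Nat) (hk : k ≠ 0) :
    (PySem.Int.mod (-(n : Int)) (k : Int)).toNat = (k - n % k) % k := by
  have hkpos : (0:Int) < (k:Int) := by exact_mod_cast Nat.pos_of_ne_zero hk
  have h4 : n % k < k := Nat.mod_lt _ (Nat.pos_of_ne_zero hk)
  rw [PySem.Int.mod_eq_emod_of_pos hkpos]
  have h1 : (-(n:Int)) = (-((n % k : Nat):Int)) + (k:Int) * (-((n / k : Nat):Int)) := by
    have h3 : (k:Int) * ((n/k : Nat):Int) + ((n % k : Nat):Int) = (n:Int) := by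
      exact_mod_cast Nat.div_add_mod n k
    linarith
  rw [h1, Int.add_mul_emod_self_left]
  rcases Nat.eq_zero_or_pos (n % k) with h0 | h0
  · rw [h0, Nat.sub_zero, Nat.mod_self]
    simp
  · have h5 : (-((n % k : Nat):Int)) = ((k - n % k : Nat) : Int) + (k:Int) * (-1) := by
      rw [Nat.cast_sub (le_of_lt h4)]; ring
    rw [h5, Int.add_mul_emod_self_left,
        Int.emod_eq_of_lt (by exact_mod_cast Nat.zero_le _)
          (by exact_mod_cast Nat.sub_lt_of_pos_le h0 (le_of_lt h4)),
        Nat.mod_eq_of_lt (show k - n % k < k by omega)]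
    simp

-- the j-th entry of the (possibly truncated) key
theorem key_getD (p : List Char) (n j : Nat) (hj : j < min n p.length) :
    ((ranksFrom p [] p).take n).getD j 0 =
      ((rkAux p (p.take j) (p[j]'(by omega)) : Nat) : Int) := by
  have hlen : ((ranksFrom p [] p).take n).length = min n p.length := by
    rw [List.length_take, ranksFrom_length]
  rw [List.getD_eq_getElem _ 0 (by rw [hlen]; exact hj), List.getElem_take,
      ranksFrom_getElem p (by omega)]

-- ===== VERDICT (by name: the statement is the Claim_ definition above) =====
theorem rearrangement_spec : Claim_equal_rearrangement := by
  intro login password hdom hpre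
  obtain ⟨hL, hP, hor⟩ := hpre
  unfold Spec_rearrangement
  have hx : '\x01' ∉ password.toList := by
    intro hmem
    unfold Dom_rearrangement at hdom
    simp only [Bool.and_eq_true, pvDomStr, List.all_eq_true] at hdom
    exact absurd (hdom.2 _ hmem) (by decide)
  have hn0 : login.toList.length ≠ 0 := by simpa [List.length_eq_zero_iff] using hL
  have hm0 : password.toList.length ≠ 0 := by simpa [List.length_eq_zero_iff] using hP
  have hRlen := ranksFrom_length password.toList
  simp only [rearrangement, rearrangement_alt]
  rw [formKey_eq password hx, ranksB_eq]
  have hkey : (if (ranksFrom password.toList [] password.toList).length > login.toList.length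
      then PySem.List.slice (ranksFrom password.toList [] password.toList)
             (some 0) (some (login.toList.length : Int))
      else ranksFrom password.toList [] password.toList)
      = (ranksFrom password.toList [] password.toList).take login.toList.length := by
    split_ifs with h
    · rw [PySem.List.slice_zero_start, PySem.List.slice_to_natCast]
    · rw [List.take_of_length_le (by omega)]
  rw [hkey, PySem.List.slice_to_natCast]
  have hklen : ((ranksFrom password.toList [] password.toList).take login.toList.length).length
      = min login.toList.length password.toList.length := by
    rw [List.length_take, hRlen]
  have hkne : ((ranksFrom password.toList [] password.toList).take login.toList.length).length ≠ 0 := by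
    rw [hklen]; omega
  rw [dif_neg hkne, padA_eq _ hkne login.toList, negmod_eq login.toList.length _ hkne]
  have hdvdT : ((ranksFrom password.toList [] password.toList).take login.toList.length).length ∣
      (login.toList ++ List.replicate
        ((((ranksFrom password.toList [] password.toList).take login.toList.length).length -
          login.toList.length %
            ((ranksFrom password.toList [] password.toList).take login.toList.length).length) %
          ((ranksFrom password.toList [] password.toList).take login.toList.length).length) ' ').length := by
    rw [List.length_append, List.length_replicate]
    exact pad_dvd _ _ hkne
  rw [chunksA_eq _ hkne _ hdvdT]
  simp only [PySem.List.foldl_append_singleton_eq_map]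
  rw [PySem.List.foldl_append_eq_flatMap, List.nil_append]
  simp only [PySem.List.pyRange_zero_nat, List.map_map, List.flatMap_map]
  congr 1
  apply List.flatMap_congr
  intro q hq
  rw [List.mem_range] at hq
  apply List.map_congr_left
  intro j hj
  rw [List.mem_range] at hj
  simp only [Function.comp_apply]
  have hjmin : j < min login.toList.length password.toList.length := by rw [← hklen]; exact hj
  have hjm : j < password.toList.length := by omega
  rw [PySem.List.pyGetD_natCast, key_getD password.toList _ j hjmin]
  · have hrkm := rkAux_take_lt password.toList hjm
    have hrkb : rkAux password.toList (password.toList.take j) (password.toList[j]'hjm) <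
        min login.toList.length password.toList.length := by
      rcases hor with hle | hall
      · omega
      · have h := hall j (by omega)
        rw [List.getD_eq_getElem _ _ hjm] at h
        simp only [rkAux] at *
        omega
    have hmul : (q + 1) * ((ranksFrom password.toList [] password.toList).take login.toList.length).length =
        q * ((ranksFrom password.toList [] password.toList).take login.toList.length).length +
        ((ranksFrom password.toList [] password.toList).take login.toList.length).length := by ring
    have hQ : q * ((ranksFrom password.toList [] password.toList).take login.toList.length).length +
        ((ranksFrom password.toList [] password.toList).take login.toList.length).length ≤
        (login.toList ++ List.replicate
          ((((ranksFrom password.toList [] password.toList).take login.toList.length).length -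
            login.toList.length %
              ((ranksFrom password.toList [] password.toList).take login.toList.length).length) %
            ((ranksFrom password.toList [] password.toList).take login.toList.length).length) ' ').length := by
      have h2 : (q + 1) * ((ranksFrom password.toList [] password.toList).take login.toList.length).length ≤
          ((login.toList ++ List.replicate
            ((((ranksFrom password.toList [] password.toList).take login.toList.length).length -
              login.toList.length %
                ((ranksFrom password.toList [] password.toList).take login.toList.length).length) %
              ((ranksFrom password.toList [] password.toList).take login.toList.length).length) ' ').length /
            ((ranksFrom password.toList [] password.toList).take login.toList.length).length) *
           ((ranksFrom password.toList [] password.toList).take login.toList.length).length :=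
        Nat.mul_le_mul_right _ hq
      rw [Nat.div_mul_cancel hdvdT, hmul] at h2
      exact h2
    rw [PySem.List.pyGetD_natCast, List.getD_eq_getElem _ ' '
          (by rw [List.length_take, List.length_drop]; omega),
        List.getElem_take, List.getElem_drop, ← Nat.cast_add,
        PySem.List.pyGetD_natCast, List.getD_eq_getElem _ ' ' (by omega)]
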